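-- pv_equiv track=rewrite | github.com/WalkerWhite/introcs-python | introcs/tuples.py | rindex_tup
-- ===== SOURCE A (Python) =====
-- def rindex_tup(tupl, value, start=None, end=None):
--     """
--     Finds the highest index of ``value`` within ``tupl`` in the range [``start``, ``end``].
--
--     Optional arguments ``start`` and ``end`` are interpreted as in slice notation. However,
--     the index returned is relative to the tuple and not the slice ``tupl[start:end]``.
--
--     This function is like :func:`rfind_tup`, except that it raises a ``ValueError`` when the
--     value is not found.
--
--     :param tupl: The tuple to search
--     :type tupl:  ``tuple``
--
--     :param value: The value to search for
--     :type value:  ``any``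
--
--     :param start: The start of the search range
--     :type start:  ``int``
--
--     :param end: The end of the search range
--     :type end:  ``int``
--
--     :return: The highest index of ``value`` within ``tupl`` in the range [``start``, ``end``].
--     :rtype:  ``int``
--     """
--     assert type(tupl) == tuple, '%s is not a tuple' % tupl
--     # Quick way to enforce slice notation
--     segs = tupl[start:end]
--     size = len(segs)
--     ends = 0 if not start else (start if start >= 0 else len(tupl)+start)
--
--     for pos in range(size):
--         if segs[-pos-1] == value:
--             return size-pos-1+ends
--
--     raise ValueError('%s not found in %s' % (repr(value),repr(tupl)))
-- ===== SOURCE B (Python) =====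
-- def rindex_tup(tupl, value, start=None, end=None):
--     """Forward single pass keeping the last matching index, instead of A's
--     reverse scan with early return."""
--     assert type(tupl) == tuple, '%s is not a tuple' % tupl
--     segs = tupl[start:end]
--     ends = 0 if not start else (start if start >= 0 else len(tupl)+start)
--     result = None
--     for pos, item in enumerate(segs):
--         if item == value:
--             result = pos + ends
--     if result is None:
--         raise ValueError('%s not found in %s' % (repr(value), repr(tupl)))
--     return result
-- ===== Notes on version B (the rewrite author's own statement) =====
-- stated objective: alternative
-- what changed: Replaces A's reverse scan with an early return by a forward single pass over the slice that keeps overwriting the result with the index of the latest match (last match wins), raising only after the loop if nothing was recorded.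
import Mathlib
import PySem

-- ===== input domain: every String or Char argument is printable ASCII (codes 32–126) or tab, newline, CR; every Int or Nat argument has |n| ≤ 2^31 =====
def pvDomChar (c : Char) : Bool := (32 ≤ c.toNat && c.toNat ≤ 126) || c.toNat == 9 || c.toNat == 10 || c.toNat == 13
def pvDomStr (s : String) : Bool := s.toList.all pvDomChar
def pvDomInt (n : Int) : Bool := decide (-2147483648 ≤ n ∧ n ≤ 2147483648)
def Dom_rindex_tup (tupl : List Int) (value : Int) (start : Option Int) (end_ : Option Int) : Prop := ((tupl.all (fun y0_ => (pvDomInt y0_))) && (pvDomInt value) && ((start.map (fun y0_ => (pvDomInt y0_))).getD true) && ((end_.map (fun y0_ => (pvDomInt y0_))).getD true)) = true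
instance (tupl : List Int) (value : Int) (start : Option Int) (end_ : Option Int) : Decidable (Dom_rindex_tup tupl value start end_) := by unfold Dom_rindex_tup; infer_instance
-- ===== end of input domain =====

-- B replaces A's reverse scan with early return by a forward single pass that keeps
-- the last matching index (objective: alternative decomposition, same cost).
-- Both Pythons raise ValueError when the value is absent from the slice; Pre_ excludes exactly that.

-- ===== PORT A =====
-- for pos in range(size): if segs[-pos-1] == value: return size-pos-1+ends
def rindexLoopA (segs : List Int) (value ends : Int) (pos : Nat) : Int :=
  if _h : pos < segs.length then
    if PySem.List.pyGetD segs (-(pos : Int) - 1) 0 = value then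
      (segs.length : Int) - (pos : Int) - 1 + ends
    else
      rindexLoopA segs value ends (pos + 1)
  else 0  -- loop falls through: Python raises ValueError here (outside Pre_)
termination_by segs.length - pos

def rindex_tup (tupl : List Int) (value : Int) (start : Option Int) (end_ : Option Int) : Int :=
  let segs := PySem.List.slice tupl start end_
  let ends : Int :=
    match start with
    | none => 0
    | some s => if s = 0 then 0 else if 0 ≤ s then s else (tupl.length : Int) + s
  rindexLoopA segs value ends 0

-- ===== PORT B =====
def rindex_tup_alt (tupl : List Int) (value : Int) (start : Option Int) (end_ : Option Int) : Int :=
  let segs := PySem.List.slice tupl start end_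
  let ends : Int :=
    match start with
    | none => 0
    | some s => if s = 0 then 0 else if 0 ≤ s then s else (tupl.length : Int) + s
  let result : Option Int :=
    (PySem.List.enumerate segs 0).foldl
      (fun acc p => if p.2 = value then some (p.1 + ends) else acc) none
  match result with
  | some r => r
  | none => 0  -- Python raises ValueError here (outside Pre_)

-- ===== PRECONDITION & SPEC =====
-- Pre_ excludes exactly the inputs where the value does not occur in the slice:
-- there both Pythons raise ValueError.
def Pre_rindex_tup (tupl : List Int) (value : Int) (start : Option Int) (end_ : Option Int) : Prop :=
  value ∈ PySem.List.slice tupl start end_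
instance (tupl : List Int) (value : Int) (start : Option Int) (end_ : Option Int) : Decidable (Pre_rindex_tup tupl value start end_) := by unfold Pre_rindex_tup; infer_instance

def pvWitness_rindex_tup : List Int × Int × Option Int × Option Int := ([1, 2, 1, 3], 1, some 1, none)

def Spec_rindex_tup (tupl : List Int) (value : Int) (start : Option Int) (end_ : Option Int) (out : Int) : Prop := out = rindex_tup_alt tupl value start end_
instance (tupl : List Int) (value : Int) (start : Option Int) (end_ : Option Int) (out : Int) : Decidable (Spec_rindex_tup tupl value start end_ out) := by unfold Spec_rindex_tup; infer_instance

-- ===== CLAIM (what is proved, stated in full; the proofs are below) =====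
def Claim_equal_rindex_tup : Prop := ∀ (tupl : List Int) (value : Int) (start : Option Int) (end_ : Option Int), Dom_rindex_tup tupl value start end_ → Pre_rindex_tup tupl value start end_ → Spec_rindex_tup tupl value start end_ (rindex_tup tupl value start end_)

-- ===== LEMMAS AND PROOFS =====

-- the last index at which v occurs (meaningful when v ∈ xs)
def lastIdx (v : Int) : List Int → Nat
  | [] => 0
  | _ :: xs => if v ∈ xs then lastIdx v xs + 1 else 0

theorem lastIdx_snoc (v a : Int) (l : List Int) :
    lastIdx v (l ++ [a]) = if a = v then l.length else lastIdx v l := by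
  induction l with
  | nil => simp [lastIdx]
  | cons x l ih =>
    by_cases hav : a = v
    · subst hav
      simp [lastIdx, List.mem_append, ih]
    · by_cases hvl : v ∈ l <;>
        simp [lastIdx, hav, ih, List.mem_append, hvl, Ne.symm hav]

theorem loopA_snoc (l : List Int) (a v ends : Int) (pos : Nat) :
    rindexLoopA (l ++ [a]) v ends (pos + 1) = rindexLoopA l v ends pos := by
  fun_induction rindexLoopA l v ends pos with
  | case1 pos h hm =>
    rw [rindexLoopA]
    have hlen : pos + 1 < (l ++ [a]).length := by simp; omega
    have hidx : PySem.List.pyGetD (l ++ [a]) (-((pos:Int)+1) - 1) 0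
        = PySem.List.pyGetD l (-(pos:Int) - 1) 0 := by
      have h1 : (-((pos:Int)+1) - 1) = -(((pos+2 : Nat) : Int)) := by push_cast; ring
      have h2 : (-(pos:Int) - 1) = -(((pos+1 : Nat) : Int)) := by push_cast; ring
      have e1 := PySem.List.pyGetD_neg_natCast (l ++ [a]) (pos+2) (0:Int) (by omega)
        (by simp only [List.length_append, List.length_cons, List.length_nil]; omega)
      have e2 := PySem.List.pyGetD_neg_natCast l (pos+1) (0:Int) (by omega) (by omega)
      rw [h1, h2, e1, e2]
      have e : (l ++ [a]).length - (pos + 2) = l.length - (pos + 1) := by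
        simp only [List.length_append, List.length_cons, List.length_nil]; omega
      simp only [e]
      rw [List.getElem_append_left (by omega)]
    simp only [Nat.cast_add, Nat.cast_one] at hidx ⊢
    rw [hidx, dif_pos hlen, if_pos hm]
    simp only [List.length_append, List.length_cons, List.length_nil]
    push_cast
    ring
  | case2 pos h hm ih =>
    rw [rindexLoopA]
    have hlen : pos + 1 < (l ++ [a]).length := by simp; omega
    have hidx : PySem.List.pyGetD (l ++ [a]) (-((pos:Int)+1) - 1) 0
        = PySem.List.pyGetD l (-(pos:Int) - 1) 0 := by
      have h1 : (-((pos:Int)+1) - 1) = -(((pos+2 : Nat) : Int)) := by push_cast; ring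
      have h2 : (-(pos:Int) - 1) = -(((pos+1 : Nat) : Int)) := by push_cast; ring
      have e1 := PySem.List.pyGetD_neg_natCast (l ++ [a]) (pos+2) (0:Int) (by omega)
        (by simp only [List.length_append, List.length_cons, List.length_nil]; omega)
      have e2 := PySem.List.pyGetD_neg_natCast l (pos+1) (0:Int) (by omega) (by omega)
      rw [h1, h2, e1, e2]
      have e : (l ++ [a]).length - (pos + 2) = l.length - (pos + 1) := by
        simp only [List.length_append, List.length_cons, List.length_nil]; omega
      simp only [e]
      rw [List.getElem_append_left (by omega)]
    simp only [Nat.cast_add, Nat.cast_one] at hidx ⊢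
    rw [hidx, dif_pos hlen, if_neg hm]
    exact ih
  | case3 pos h =>
    have h2 : ¬ (pos + 1 < (l ++ [a]).length) := by
      simp only [List.length_append, List.length_cons, List.length_nil]; omega
    rw [rindexLoopA, dif_neg h2]

theorem loopA_eq_lastIdx (v ends : Int) (segs : List Int) (hv : v ∈ segs) :
    rindexLoopA segs v ends 0 = (lastIdx v segs : Int) + ends := by
  induction segs using List.reverseRecOn with
  | nil => simp at hv
  | append_singleton l a ih =>
    rw [rindexLoopA]
    have hlen : 0 < (l ++ [a]).length := by simp
    have hidx : PySem.List.pyGetD (l ++ [a]) (-(0:Int) - 1) 0 = a := by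
      have : (-(0:Int) - 1) = (-1 : Int) := by ring
      rw [this, PySem.List.pyGetD_neg_one_append_singleton]
    simp only [Nat.cast_zero] at hidx ⊢
    rw [hidx, dif_pos hlen]
    by_cases hav : a = v
    · rw [if_pos hav, lastIdx_snoc, if_pos hav]
      simp only [List.length_append, List.length_cons, List.length_nil]
      push_cast
      ring
    · rw [if_neg hav]
      rw [loopA_snoc l a v ends 0, lastIdx_snoc, if_neg hav]
      have hvl : v ∈ l := by
        rcases List.mem_append.mp hv with h | h
        · exact h
        · simp at h; exact absurd h.symm hav
      exact ih hvl

theorem foldB_eq_lastIdx (v ends : Int) (xs : List Int) :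
    ∀ (s : Int) (acc : Option Int),
    (PySem.List.enumerate xs s).foldl
        (fun acc p => if p.2 = v then some (p.1 + ends) else acc) acc
      = if v ∈ xs then some (s + (lastIdx v xs : Int) + ends) else acc := by
  induction xs with
  | nil => intro s acc; simp [PySem.List.enumerate_nil]
  | cons x xs ih =>
    intro s acc
    rw [PySem.List.enumerate_cons]
    simp only [List.foldl_cons, ih]
    by_cases hvx : v ∈ xs
    · simp only [lastIdx, hvx, if_pos (List.mem_cons_of_mem x hvx), if_true]
      have hc : ((lastIdx v xs + 1 : Nat) : Int) = (lastIdx v xs : Int) + 1 := by push_cast; ring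
      rw [hc]
      ring_nf
    · by_cases hx : x = v
      · simp [lastIdx, hvx, hx, List.mem_cons]
      · simp [hvx, hx, List.mem_cons, Ne.symm hx]

-- ===== VERDICT (by name: the statement is the Claim_ definition above) =====
theorem rindex_tup_spec : Claim_equal_rindex_tup := by
  intro tupl value start end_ _hdom hpre
  unfold Pre_rindex_tup at hpre
  simp only [Spec_rindex_tup, rindex_tup, rindex_tup_alt]
  rw [foldB_eq_lastIdx, if_pos hpre, loopA_eq_lastIdx value _ _ hpre]
  simp
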